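-- pv_equiv track=rewrite | github.com/amargosavi68/python-mini-challenges | code.py | k_distinct
-- ===== SOURCE A (Python) =====
-- def k_distinct(string,k):
--     string = string.lower()
--     L = []
--     for i in range(len(string)):
--         if string[i] not in L:
--             L.append(string[i])
--         else:
--             continue
--
--     if len(L) >=k:
--         return True
--
--     else:
--         return False
-- ===== SOURCE B (Python) =====
-- def k_distinct(string, k):
--     cs = sorted(string.lower())
--     count = 0
--     prev = None
--     for c in cs:
--         if c != prev:
--             count += 1
--         prev = c
--     return count >= k
-- ===== Notes on version B (the rewrite author's own statement) =====
-- stated objective: alternative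
-- what changed: Replaces the membership-test accumulation list with sort-then-adjacent-difference counting of distinct characters.
import Mathlib
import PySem

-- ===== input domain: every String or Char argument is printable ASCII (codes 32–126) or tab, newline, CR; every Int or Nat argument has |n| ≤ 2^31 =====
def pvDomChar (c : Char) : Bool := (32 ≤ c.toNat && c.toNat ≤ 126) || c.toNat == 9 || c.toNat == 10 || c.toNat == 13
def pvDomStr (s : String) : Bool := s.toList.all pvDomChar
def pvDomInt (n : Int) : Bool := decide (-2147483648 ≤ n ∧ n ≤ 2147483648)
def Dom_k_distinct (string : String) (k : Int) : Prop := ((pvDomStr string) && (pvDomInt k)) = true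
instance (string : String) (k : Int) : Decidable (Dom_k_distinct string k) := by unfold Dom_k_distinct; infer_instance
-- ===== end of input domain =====

-- B replaces A's membership-accumulation list with sort + adjacent-difference distinct counting (alternative decomposition).

-- ===== PORT A =====
def k_distinct (string : String) (k : Int) : Bool :=
  let s := (PySem.Str.lower string).toList
  let L := s.foldl (fun (L : List Char) c => if L.contains c then L else L ++ [c]) []
  decide ((L.length : Int) ≥ k)

-- ===== PORT B =====
def k_distinct_alt (string : String) (k : Int) : Bool :=
  let cs := PySem.List.sorted ((PySem.Str.lower string).toList) (fun x => x) false
  let st := cs.foldl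
    (fun (st : Int × Option Char) c => (if some c = st.2 then st.1 else st.1 + 1, some c)) (0, none)
  decide (st.1 ≥ k)

-- ===== PRECONDITION & SPEC =====
def Spec_k_distinct (string : String) (k : Int) (out : Bool) : Prop := out = k_distinct_alt string k
instance (string : String) (k : Int) (out : Bool) : Decidable (Spec_k_distinct string k out) := by unfold Spec_k_distinct; infer_instance

-- ===== CLAIM (what is proved, stated in full; the proofs are below) =====
def Claim_equal_k_distinct : Prop := ∀ (string : String) (k : Int), Dom_k_distinct string k → Spec_k_distinct string k (k_distinct string k)

-- ===== LEMMAS AND PROOFS =====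

-- the adjacent-difference scan over a sorted list counts the distinct elements not equal to prev
lemma pv_scan_inv (ys : List Char) (n : Int) (p : Option Char)
    (hs : ys.Pairwise (· ≤ ·))
    (hp : ∀ y ∈ ys, ∀ q, p = some q → q ≤ y) :
    (ys.foldl
      (fun (st : Int × Option Char) c => (if some c = st.2 then st.1 else st.1 + 1, some c))
      (n, p)).1
    = n + ((ys.toFinset.filter (fun c => some c ≠ p)).card : Int) := by
  induction ys generalizing n p with
  | nil => simp
  | cons c rest ih =>
    rcases List.pairwise_cons.mp hs with ⟨hc, hrest⟩
    have hp' : ∀ y ∈ rest, ∀ q, (some c : Option Char) = some q → q ≤ y := by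
      intro y hy q hq
      cases hq
      exact hc y hy
    simp only [List.foldl_cons]
    by_cases h : some c = p
    · rw [if_pos h]
      rw [ih n (some c) hrest hp']
      subst h
      have : (List.toFinset (c :: rest)).filter (fun x => some x ≠ some c)
          = rest.toFinset.filter (fun x => some x ≠ some c) := by
        simp [List.toFinset_cons, Finset.filter_insert]
      rw [this]
    · rw [if_neg h]
      rw [ih (n + 1) (some c) hrest hp']
      have hfiltp : rest.toFinset.filter (fun x => some x ≠ p) = rest.toFinset := by
        apply Finset.filter_true_of_mem
        intro y hy
        simp only [ne_eq]
        intro hyp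
        rcases p with _ | q
        · simp at hyp
        · have hqc : q ≤ c := hp c (List.mem_cons_self ..) q rfl
          have hcy : c ≤ y := hc y (List.mem_toFinset.mp hy)
          have hyq : y = q := Option.some.inj hyp
          subst hyq
          exact h (by rw [le_antisymm hqc hcy])
    -- A reference-free arithmetic finish
      have hfc : (List.toFinset (c :: rest)).filter (fun x => some x ≠ p)
          = insert c (rest.toFinset.filter (fun x => some x ≠ p)) := by
        rw [List.toFinset_cons, Finset.filter_insert, if_pos]
        simpa using h
      have herase : rest.toFinset.filter (fun x => some x ≠ some c) = rest.toFinset.erase c := by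
        rw [← Finset.filter_ne']
        apply Finset.filter_congr
        intro y _
        simp
      rw [hfc, hfiltp, herase]
      by_cases hmem : c ∈ rest.toFinset
      · rw [Finset.insert_eq_self.mpr hmem]
        have := Finset.card_erase_add_one hmem
        omega
      · rw [Finset.card_insert_of_notMem hmem, Finset.erase_eq_self.mpr hmem]
        push_cast
        omega

-- A's accumulation list is exactly set-of-list (first occurrences)
lemma pv_foldA_eq_ofList (s : List Char) :
    s.foldl (fun (L : List Char) c => if L.contains c then L else L ++ [c]) []
      = PySem.Set.ofList s := rfl

lemma pv_ofList_length_eq_card (s : List Char) :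
    (PySem.Set.ofList s).length = s.toFinset.card := by
  have hn : (PySem.Set.ofList s).Nodup := PySem.Set.nodup_ofList s
  have hfs : (PySem.Set.ofList s).toFinset = s.toFinset := by
    ext x
    simp [PySem.Set.mem_ofList]
  rw [← List.toFinset_card_of_nodup hn, hfs]

-- ===== VERDICT (by name: the statement is the Claim_ definition above) =====
theorem k_distinct_spec : Claim_equal_k_distinct := by
  intro string k _
  unfold Spec_k_distinct k_distinct k_distinct_alt
  simp only []
  set s := (PySem.Str.lower string).toList with hsdef
  set cs := PySem.List.sorted s (fun x => x) false with hcs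
  have hsorted : cs.Pairwise (· ≤ ·) := PySem.List.sorted_pairwise s (fun x => x)
  have hscan := pv_scan_inv cs 0 none hsorted (by intro y _ q hq; simp at hq)
  have hfilt : cs.toFinset.filter (fun c => some c ≠ none) = cs.toFinset := by
    apply Finset.filter_true_of_mem; intro y _; simp
  have hperm : cs.Perm s := PySem.List.sorted_perm s (fun x => x) false
  have htf : cs.toFinset = s.toFinset := List.toFinset_eq_of_perm _ _ hperm
  rw [pv_foldA_eq_ofList, decide_eq_decide, hscan, hfilt, htf, pv_ofList_length_eq_card]
  omega
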